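-- pv_equiv track=rewrite | github.com/PolicyStat/htmltreediff | htmltreediff/lcs.py | group_consecutive_pairs_into_blocks
-- ===== SOURCE A (Python) =====
-- def group_consecutive_pairs_into_blocks(matched_pairs, n, m):
--     blocks = []
--     k = 0
--     while k < len(matched_pairs):
--         a, b = matched_pairs[k]
--         size = 1
--         while (
--             k + size < len(matched_pairs) and matched_pairs[k + size] == (a + size, b + size)
--         ):
--             size += 1
--         blocks.append((a, b, size))
--         k += size
--     blocks.append((n, m, 0))  # sentinel
--     return blocks
-- ===== SOURCE B (Python) =====
-- def group_consecutive_pairs_into_blocks(matched_pairs, n, m):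
--     blocks = []
--     start_a = start_b = 0
--     size = 0
--     for a, b in matched_pairs:
--         if size > 0 and (a, b) == (start_a + size, start_b + size):
--             size += 1
--         else:
--             if size > 0:
--                 blocks.append((start_a, start_b, size))
--             start_a, start_b = a, b
--             size = 1
--     if size > 0:
--         blocks.append((start_a, start_b, size))
--     blocks.append((n, m, 0))
--     return blocks
-- ===== Notes on version B (the rewrite author's own statement) =====
-- stated objective: simpler
-- what changed: Replaced the nested while loops with index jumps (k += size) by a single for-loop over the pairs that maintains the current block's start and running size and flushes a block when the run breaks.
import Mathlib
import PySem

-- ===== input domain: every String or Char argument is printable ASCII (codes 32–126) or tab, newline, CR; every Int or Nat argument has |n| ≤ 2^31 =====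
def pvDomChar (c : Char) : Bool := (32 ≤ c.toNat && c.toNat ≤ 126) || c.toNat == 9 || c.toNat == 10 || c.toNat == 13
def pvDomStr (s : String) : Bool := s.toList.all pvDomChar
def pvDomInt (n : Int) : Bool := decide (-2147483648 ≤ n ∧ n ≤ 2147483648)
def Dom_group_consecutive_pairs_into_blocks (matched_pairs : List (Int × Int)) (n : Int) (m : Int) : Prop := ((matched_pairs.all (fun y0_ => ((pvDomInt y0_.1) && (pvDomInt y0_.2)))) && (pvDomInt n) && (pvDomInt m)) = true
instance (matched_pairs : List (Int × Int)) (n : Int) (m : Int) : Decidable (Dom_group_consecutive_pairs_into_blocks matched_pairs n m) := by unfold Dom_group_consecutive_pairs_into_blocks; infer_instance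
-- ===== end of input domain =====

-- B replaces A's nested while loops with index jumps by one for-loop keeping the
-- current block's start and running size (objective: simpler); both are total, no Pre_.

-- ===== PORT A =====
-- inner while: extends size while matched_pairs[k+size] == (a+size, b+size)
def pvAInner (mp : List (Int × Int)) (k : Nat) (a b : Int) (size : Nat) : Nat :=
  if h : k + size < mp.length ∧ mp[k + size]! = (a + (size : Int), b + (size : Int)) then
    pvAInner mp k a b (size + 1)
  else size
termination_by mp.length - (k + size)
decreasing_by omega

-- the inner while never decreases size (needed for the outer loop's termination)
theorem pvAInner_ge (mp : List (Int × Int)) (k : Nat) (a b : Int) (size : Nat) :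
    size ≤ pvAInner mp k a b size := by
  unfold pvAInner
  split
  · exact le_trans (Nat.le_succ _) (pvAInner_ge mp k a b (size + 1))
  · exact le_refl _
termination_by mp.length - (k + size)
decreasing_by omega

-- outer while: k jumps by the size of the block just emitted
def pvALoop (mp : List (Int × Int)) (k : Nat) : List (Int × Int × Int) :=
  if h : k < mp.length then
    let p := mp[k]!
    let size := pvAInner mp k p.1 p.2 1
    (p.1, p.2, (size : Int)) :: pvALoop mp (k + size)
  else []
termination_by mp.length - k
decreasing_by have := pvAInner_ge mp k (mp[k]!).1 (mp[k]!).2 1; omega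

def group_consecutive_pairs_into_blocks (matched_pairs : List (Int × Int)) (n : Int) (m : Int) : List (Int × Int × Int) :=
  pvALoop matched_pairs 0 ++ [(n, m, 0)]

-- ===== PORT B =====
-- state: (blocks so far, start_a, start_b, size of the current pending run)
def pvBStep (st : List (Int × Int × Int) × Int × Int × Int) (p : Int × Int) :
    List (Int × Int × Int) × Int × Int × Int :=
  let (blocks, sa, sb, size) := st
  if size > 0 ∧ p = (sa + size, sb + size) then
    (blocks, sa, sb, size + 1)
  else
    ((if size > 0 then blocks ++ [(sa, sb, size)] else blocks), p.1, p.2, 1)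

def group_consecutive_pairs_into_blocks_alt (matched_pairs : List (Int × Int)) (n : Int) (m : Int) : List (Int × Int × Int) :=
  let st := matched_pairs.foldl pvBStep ([], 0, 0, 0)
  let blocks := if st.2.2.2 > 0 then st.1 ++ [(st.2.1, st.2.2.1, st.2.2.2)] else st.1
  blocks ++ [(n, m, 0)]

-- ===== PRECONDITION & SPEC =====
def Spec_group_consecutive_pairs_into_blocks (matched_pairs : List (Int × Int)) (n : Int) (m : Int) (out : List (Int × Int × Int)) : Prop := out = group_consecutive_pairs_into_blocks_alt matched_pairs n m
instance (matched_pairs : List (Int × Int)) (n : Int) (m : Int) (out : List (Int × Int × Int)) : Decidable (Spec_group_consecutive_pairs_into_blocks matched_pairs n m out) := by unfold Spec_group_consecutive_pairs_into_blocks; infer_instance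

-- ===== CLAIM (what is proved, stated in full; the proofs are below) =====
def Claim_equal_group_consecutive_pairs_into_blocks : Prop := ∀ (matched_pairs : List (Int × Int)) (n : Int) (m : Int), Dom_group_consecutive_pairs_into_blocks matched_pairs n m → Spec_group_consecutive_pairs_into_blocks matched_pairs n m (group_consecutive_pairs_into_blocks matched_pairs n m)

-- ===== LEMMAS AND PROOFS =====

-- reference: maximal runs, one "in-progress block (a,b) of size s" at a time
def pvRunsFrom (a b s : Int) : List (Int × Int) → List (Int × Int × Int)
  | [] => [(a, b, s)]
  | p :: rest =>
    if p = (a + s, b + s) then pvRunsFrom a b (s + 1) rest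
    else (a, b, s) :: pvRunsFrom p.1 p.2 1 rest

def pvRuns : List (Int × Int) → List (Int × Int × Int)
  | [] => []
  | p :: rest => pvRunsFrom p.1 p.2 1 rest

def pvFlush (st : List (Int × Int × Int) × Int × Int × Int) : List (Int × Int × Int) :=
  if st.2.2.2 > 0 then st.1 ++ [(st.2.1, st.2.2.1, st.2.2.2)] else st.1

theorem pvBStep_ext (blocks : List (Int × Int × Int)) (sa sb : Int) (s : Int) (p : Int × Int)
    (hs : 0 < s) (hp : p = (sa + s, sb + s)) :
    pvBStep (blocks, sa, sb, s) p = (blocks, sa, sb, s + 1) := by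
  simp [pvBStep, hs, hp]

theorem pvBStep_brk (blocks : List (Int × Int × Int)) (sa sb : Int) (s : Int) (p : Int × Int)
    (hs : 0 < s) (hp : ¬ p = (sa + s, sb + s)) :
    pvBStep (blocks, sa, sb, s) p = (blocks ++ [(sa, sb, s)], p.1, p.2, 1) := by
  simp [pvBStep, hs, hp]

theorem pvBStep_zero (blocks : List (Int × Int × Int)) (sa sb : Int) (p : Int × Int) :
    pvBStep (blocks, sa, sb, (0:Int)) p = (blocks, p.1, p.2, 1) := by
  simp [pvBStep]

-- B's fold with a pending block equals blocks ++ runsFrom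
theorem pvB_fold (xs : List (Int × Int)) : ∀ (blocks : List (Int × Int × Int)) (sa sb s : Int),
    0 < s →
    pvFlush (xs.foldl pvBStep (blocks, sa, sb, s)) = blocks ++ pvRunsFrom sa sb s xs := by
  induction xs with
  | nil =>
      intro blocks sa sb s hs
      simp [pvFlush, pvRunsFrom, hs]
  | cons p rest ih =>
      intro blocks sa sb s hs
      by_cases hp : p = (sa + s, sb + s)
      · rw [List.foldl_cons, pvBStep_ext blocks sa sb s p hs hp,
          ih blocks sa sb (s + 1) (by omega)]
        simp [pvRunsFrom, hp]
      · rw [List.foldl_cons, pvBStep_brk blocks sa sb s p hs hp,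
          ih (blocks ++ [(sa, sb, s)]) p.1 p.2 1 one_pos]
        simp [pvRunsFrom, hp]

theorem pvB_eq_runs (mp : List (Int × Int)) (n m : Int) :
    group_consecutive_pairs_into_blocks_alt mp n m = pvRuns mp ++ [(n, m, 0)] := by
  cases mp with
  | nil => simp [group_consecutive_pairs_into_blocks_alt, pvRuns]
  | cons p rest =>
      show pvFlush (rest.foldl pvBStep (pvBStep ([], 0, 0, 0) p)) ++ [(n, m, 0)]
        = pvRuns (p :: rest) ++ [(n, m, 0)]
      rw [pvBStep_zero, pvB_fold rest [] p.1 p.2 1 one_pos]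
      rfl

-- aLoop past the end is empty
theorem pvALoop_end (mp : List (Int × Int)) (k : Nat) (hk : mp.length ≤ k) :
    pvALoop mp k = [] := by
  unfold pvALoop
  rw [dif_neg (by omega)]

-- the inner while with pending block (a,b,s) matches runsFrom over the tail,
-- provided aLoop already agrees with runs on later positions
theorem pvAInner_cont (mp : List (Int × Int)) (k : Nat) (a b : Int) :
    ∀ d s : Nat, mp.length ≤ k + s + d → 1 ≤ s →
    (∀ j, k + s ≤ j → pvALoop mp j = pvRuns (mp.drop j)) →
    ((a, b, (pvAInner mp k a b s : Int)) :: pvALoop mp (k + pvAInner mp k a b s))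
      = pvRunsFrom a b s (mp.drop (k + s)) := by
  intro d
  induction d with
  | zero =>
      intro s hd hs hloop
      have hlen : mp.length ≤ k + s := by omega
      rw [List.drop_eq_nil_of_le hlen]
      unfold pvAInner
      rw [dif_neg (by intro h; omega)]
      rw [pvALoop_end mp (k + s) hlen]
      rfl
  | succ d ih =>
      intro s hd hs hloop
      by_cases hlt : k + s < mp.length
      · have hdrop : mp.drop (k + s) = mp[k + s]! :: mp.drop (k + s + 1) := by
          rw [List.drop_eq_getElem_cons hlt, getElem!_pos mp (k + s) hlt]
        unfold pvAInner
        by_cases hp : mp[k + s]! = (a + (s : Int), b + (s : Int))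
        · rw [dif_pos ⟨hlt, hp⟩]
          have hrec := ih (s + 1) (by omega) (by omega) (fun j hj => hloop j (by omega))
          have e : pvRunsFrom a b s (mp.drop (k + s))
              = pvRunsFrom a b ((s : Int) + 1) (mp.drop (k + s + 1)) := by
            rw [hdrop]; simp only [pvRunsFrom]; rw [if_pos hp]
          rw [e]
          have ecast : ((s + 1 : Nat) : Int) = (s : Int) + 1 := by push_cast; ring
          rw [show k + (s + 1) = k + s + 1 from rfl, ecast] at hrec
          exact hrec
        · rw [dif_neg (by intro h; exact hp h.2)]
          rw [hdrop]
          simp only [pvRunsFrom]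
          rw [if_neg hp]
          have hL : pvALoop mp (k + s) = pvRuns (mp.drop (k + s)) := hloop (k + s) (le_refl _)
          rw [hL, hdrop]
          rfl
      · have hlen : mp.length ≤ k + s := by omega
        rw [List.drop_eq_nil_of_le hlen]
        unfold pvAInner
        rw [dif_neg (by intro h; omega)]
        rw [pvALoop_end mp (k + s) hlen]
        rfl

-- the outer while agrees with runs on every suffix
theorem pvALoop_eq_runs (mp : List (Int × Int)) :
    ∀ d k : Nat, mp.length ≤ k + d → pvALoop mp k = pvRuns (mp.drop k) := by
  intro d
  induction d with
  | zero =>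
      intro k hk
      rw [pvALoop_end mp k (by omega), List.drop_eq_nil_of_le (by omega)]
      rfl
  | succ d ih =>
      intro k hk
      by_cases hkl : k < mp.length
      · have hdrop : mp.drop k = mp[k]! :: mp.drop (k + 1) := by
          rw [List.drop_eq_getElem_cons hkl, getElem!_pos mp k hkl]
        unfold pvALoop
        rw [dif_pos hkl, hdrop]
        show ((mp[k]!.1, mp[k]!.2, _) :: pvALoop mp (k + pvAInner mp k mp[k]!.1 mp[k]!.2 1))
          = pvRuns (mp[k]! :: mp.drop (k + 1))
        have := pvAInner_cont mp k mp[k]!.1 mp[k]!.2 d 1 (by omega) (le_refl _)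
          (fun j hj => ih j (by omega))
        rw [show pvRuns (mp[k]! :: mp.drop (k + 1)) = pvRunsFrom mp[k]!.1 mp[k]!.2 1 (mp.drop (k + 1)) from rfl]
        simpa using this
      · rw [pvALoop_end mp k (by omega), List.drop_eq_nil_of_le (by omega)]
        rfl

-- ===== VERDICT (by name: the statement is the Claim_ definition above) =====
theorem group_consecutive_pairs_into_blocks_spec : Claim_equal_group_consecutive_pairs_into_blocks := by
  intro mp n m _
  unfold Spec_group_consecutive_pairs_into_blocks group_consecutive_pairs_into_blocks
  rw [pvB_eq_runs, pvALoop_eq_runs mp mp.length 0 (by omega)]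
  simp
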